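-- pv_equiv track=rewrite | github.com/ofermagen98/NLP_Project | formatter.py | sent2list
-- ===== SOURCE A (Python) =====
-- def sent2list(sent,size = 40):
--     replace = lambda c: c if c.isdigit() or c.isalpha() else ' '
--     sent = ''.join(map(replace,sent))
--     sent = sent.split(' ')
--     sent = filter(lambda w: len(w) > 0, sent)
--     sent = list(sent)
--     sent = sent[:size]
--     for _ in range(len(sent),size): sent.append(pad_word)
--     return list(sent)
--
-- pad_word = '_UNIQUE_PADDING_WORD'
-- ===== SOURCE B (Python) =====
-- pad_word = '_UNIQUE_PADDING_WORD'
--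
-- def sent2list(sent, size=40):
--     tokens = []
--     buf = ''
--     for c in sent:
--         if c.isdigit() or c.isalpha():
--             buf += c
--         else:
--             if buf:
--                 tokens.append(buf)
--                 buf = ''
--     if buf:
--         tokens.append(buf)
--     tokens = tokens[:size]
--     while len(tokens) < size:
--         tokens.append(pad_word)
--     return tokens
-- ===== Notes on version B (the rewrite author's own statement) =====
-- stated objective: alternative
-- what changed: Replaces the join(map(replace))+split-on-space+filter pipeline (three intermediate sequences) by a single left-to-right character scan with a word buffer that emits tokens directly, then slices and pads with a while loop instead of a range loop.
import Mathlib
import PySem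

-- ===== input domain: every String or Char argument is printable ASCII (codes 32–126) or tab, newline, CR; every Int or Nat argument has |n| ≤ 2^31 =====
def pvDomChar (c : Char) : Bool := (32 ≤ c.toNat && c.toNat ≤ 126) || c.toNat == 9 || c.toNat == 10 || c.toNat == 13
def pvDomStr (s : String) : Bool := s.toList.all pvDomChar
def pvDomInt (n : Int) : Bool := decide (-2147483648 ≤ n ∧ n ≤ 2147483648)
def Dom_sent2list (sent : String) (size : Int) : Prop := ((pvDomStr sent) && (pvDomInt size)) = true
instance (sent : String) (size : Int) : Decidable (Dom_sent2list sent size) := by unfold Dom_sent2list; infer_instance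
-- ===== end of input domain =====

-- B replaces A's join(map(replace))+split-on-space+filter pipeline by a single character scan
-- with a word buffer (a different decomposition, same cost); return values proved equal on all inputs.

def pvPadWord : String := "_UNIQUE_PADDING_WORD"

-- ===== PORT A =====
-- replace = lambda c: c if c.isdigit() or c.isalpha() else ' '
def pvRepl (c : Char) : Char :=
  if PySem.Chars.isdigit c || PySem.Chars.isalpha c then c else ' '

def sent2list (sent : String) (size : Int) : List String :=
  let mapped := sent.toList.map pvRepl
  let parts := PySem.Chars.splitOn mapped [' ']
  let words := parts.filter (fun w => w.length > 0)
  let strs := words.map String.ofList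
  let sliced := PySem.List.slice strs none (some size)
  (PySem.List.pyRange (sliced.length : Int) size 1).foldl (fun acc _ => acc ++ [pvPadWord]) sliced

-- ===== PORT B =====
-- one step of B's character scan: extend the buffer on a word char, flush it on a separator
def pvStep (st : List (List Char) × List Char) (c : Char) : List (List Char) × List Char :=
  if PySem.Chars.isdigit c || PySem.Chars.isalpha c then (st.1, st.2 ++ [c])
  else if st.2 = [] then st else (st.1 ++ [st.2], [])

-- 'if buf: tokens.append(buf)' — flush the final buffer after the loop
def pvFlush (st : List (List Char) × List Char) : List (List Char) :=
  if st.2 = [] then st.1 else st.1 ++ [st.2]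

-- while len(tokens) < size: tokens.append(pad_word)
def pvPadWhile (ts : List String) (size : Int) : List String :=
  if (ts.length : Int) < size then pvPadWhile (ts ++ [pvPadWord]) size else ts
termination_by (size - ts.length).toNat
decreasing_by simp only [List.length_append, List.length_cons, List.length_nil]; omega

def sent2list_alt (sent : String) (size : Int) : List String :=
  let tokens := pvFlush (sent.toList.foldl pvStep ([], []))
  pvPadWhile (PySem.List.slice (tokens.map String.ofList) none (some size)) size

-- ===== PRECONDITION & SPEC =====
def Spec_sent2list (sent : String) (size : Int) (out : List String) : Prop := out = sent2list_alt sent size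
instance (sent : String) (size : Int) (out : List String) : Decidable (Spec_sent2list sent size out) := by unfold Spec_sent2list; infer_instance

-- ===== CLAIM (what is proved, stated in full; the proofs are below) =====
def Claim_equal_sent2list : Prop := ∀ (sent : String) (size : Int), Dom_sent2list sent size → Spec_sent2list sent size (sent2list sent size)

-- ===== LEMMAS AND PROOFS =====

-- fuel-free structural recursion computing split(' ') (cur holds the current piece, reversed)
def pvSplitSp : List Char → List Char → List (List Char)
  | [], cur => [cur.reverse]
  | c :: rest, cur => if c = ' ' then cur.reverse :: pvSplitSp rest [] else pvSplitSp rest (c :: cur)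

lemma pvSplitOn_go_eq : ∀ (l : List Char) (fuel : Nat), l.length ≤ fuel → ∀ (cur : List Char) (acc : List (List Char)),
    PySem.Chars.splitOn.go [' '] fuel l cur acc = acc.reverse ++ pvSplitSp l cur := by
  intro l
  induction l with
  | nil =>
    intro fuel _ cur acc
    cases fuel <;> simp [PySem.Chars.splitOn.go, pvSplitSp]
  | cons c rest ih =>
    intro fuel hf cur acc
    cases fuel with
    | zero => simp at hf
    | succ f =>
      rw [PySem.Chars.splitOn.go]
      simp only [List.length_cons, Nat.succ_le_succ_iff] at hf
      by_cases hc : c = ' '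
      · subst hc
        simp only [List.isPrefixOf, beq_self_eq_true, Bool.true_and, if_true, List.length_cons, List.drop_succ_cons, pvSplitSp]
        simp only [List.length_nil, List.drop_zero]
        rw [ih f hf [] (cur.reverse :: acc)]
        simp
      · have : ([' '].isPrefixOf (c :: rest)) = false := by
          simp [List.isPrefixOf]; exact fun h => hc (by simpa using h.symm)
        rw [this]
        simp only [Bool.false_eq_true, if_false, pvSplitSp, if_neg hc]
        exact ih f hf (c :: cur) acc

lemma pvSplitOn_eq (l : List Char) : PySem.Chars.splitOn l [' '] = pvSplitSp l [] := by
  unfold PySem.Chars.splitOn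
  rw [pvSplitOn_go_eq l (l.length + 1) (by omega) [] []]
  simp

lemma pvWordChar_ne_space (c : Char) (h : (PySem.Chars.isdigit c || PySem.Chars.isalpha c) = true) : c ≠ ' ' := by
  intro hc; subst hc; simp [PySem.Chars.isdigit, PySem.Chars.isalpha, PySem.Chars.isupper, PySem.Chars.islower] at h

lemma pvScan_eq : ∀ (cs : List Char) (toks : List (List Char)) (buf : List Char),
    pvFlush (cs.foldl pvStep (toks, buf))
      = toks ++ (pvSplitSp (cs.map pvRepl) buf.reverse).filter (fun w => w.length > 0) := by
  intro cs
  induction cs with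
  | nil =>
    intro toks buf
    simp only [List.foldl_nil, List.map_nil, pvSplitSp, List.reverse_reverse, List.filter, pvFlush]
    by_cases hb : buf = []
    · subst hb; simp
    · simp [hb, List.length_pos_iff.mpr hb]
  | cons c cs ih =>
    intro toks buf
    simp only [List.foldl_cons, List.map_cons, pvStep, pvRepl]
    by_cases hk : (PySem.Chars.isdigit c || PySem.Chars.isalpha c) = true
    · rw [if_pos hk, if_pos hk]
      have hne := pvWordChar_ne_space c hk
      simp only [pvSplitSp, if_neg hne]
      rw [ih toks (buf ++ [c])]
      simp
    · rw [if_neg hk, if_neg hk]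
      by_cases hb : buf = []
      · subst hb
        simp only [pvSplitSp, List.reverse_nil, reduceIte]
        rw [ih toks []]
        simp
      · simp only [pvSplitSp, if_neg hb, List.reverse_reverse, reduceIte]
        rw [ih (toks ++ [buf]) []]
        simp [List.length_pos_iff.mpr hb]

lemma pvFoldl_pad (ts : List String) (size : Int) :
    (PySem.List.pyRange (ts.length : Int) size 1).foldl (fun acc _ => acc ++ [pvPadWord]) ts
      = ts ++ List.replicate (size - ts.length).toNat pvPadWord := by
  rw [PySem.List.foldl_append_singleton_eq_map (fun _ => pvPadWord)]
  congr 1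
  rw [List.map_const']
  congr 1
  simp only [PySem.List.pyRange]
  split_ifs with h1 h2 <;> simp_all

lemma pvPadWhile_eq (ts : List String) (size : Int) :
    pvPadWhile ts size = ts ++ List.replicate (size - ts.length).toNat pvPadWord := by
  fun_induction pvPadWhile ts size with
  | case1 ts h ih =>
    rw [ih]
    simp only [List.length_append, List.length_cons, List.length_nil, List.append_assoc,
      List.singleton_append]
    congr 1
    rw [← List.replicate_succ]
    congr 1
    omega
  | case2 ts h =>
    have : (size - (ts.length : Int)).toNat = 0 := by omega
    simp [this]

-- ===== VERDICT (by name: the statement is the Claim_ definition above) =====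
theorem sent2list_spec : Claim_equal_sent2list := by
  intro sent size _
  unfold Spec_sent2list sent2list sent2list_alt
  simp only [pvSplitOn_eq, pvFoldl_pad, pvPadWhile_eq, pvScan_eq, List.reverse_nil, List.nil_append]
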